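-- pv_equiv track=rewrite | github.com/cylejren/zielone_koktajle | projekt_zielone_koktajle/zielone_koktajle.py | result
-- ===== SOURCE A (Python) =====
-- def result(ingredients_sites_list, count):
--     # return common sites from the list of sites from given ingredients
--     # count - nuber of ingredients
--
--     result = []
--
--     for site in ingredients_sites_list:
--         if ingredients_sites_list.count(site) == count:
--             if site in result:
--                 continue
--             result.append(site)
--
--     return result
-- ===== SOURCE B (Python) =====
-- def result(ingredients_sites_list, count):
--     # B: tally all sites once into a dict (insertion-ordered, unique keys),
--     # then collect the keys whose tally equals count.
--     counts = {}
--     for site in ingredients_sites_list: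
--         counts[site] = counts.get(site, 0) + 1
--     return [site for site, c in counts.items() if c == count]
-- ===== Notes on version B (the rewrite author's own statement) =====
-- stated objective: faster
-- what changed: Replace per-element list.count rescans plus a seen-list membership dedup with a single counting pass into a dict followed by one comprehension over its unique, first-occurrence-ordered keys.
import Mathlib
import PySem

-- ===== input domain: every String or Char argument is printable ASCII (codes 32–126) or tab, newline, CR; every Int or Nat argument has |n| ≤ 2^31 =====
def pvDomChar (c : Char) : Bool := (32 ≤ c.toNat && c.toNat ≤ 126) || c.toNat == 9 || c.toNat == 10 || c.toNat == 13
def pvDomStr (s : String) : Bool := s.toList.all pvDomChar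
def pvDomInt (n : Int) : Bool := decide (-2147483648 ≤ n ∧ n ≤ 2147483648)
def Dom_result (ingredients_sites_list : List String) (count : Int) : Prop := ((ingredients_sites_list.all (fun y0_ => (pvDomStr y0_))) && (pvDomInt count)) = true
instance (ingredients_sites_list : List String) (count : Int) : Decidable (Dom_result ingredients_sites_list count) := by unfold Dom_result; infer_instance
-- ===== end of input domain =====

-- B replaces A's per-element list.count rescans and seen-list dedup with one counting
-- pass into a dict plus one comprehension over its unique keys (objective: faster).


-- ===== PORT A =====
-- for site in list: if list.count(site) == count: if site in result: continue; result.append(site)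
def result (ingredients_sites_list : List String) (count : Int) : List String :=
  ingredients_sites_list.foldl
    (fun res site =>
      if ((PySem.List.count ingredients_sites_list site : Int) == count) then
        if res.contains site then res else res ++ [site]
      else res)
    []

-- ===== PORT B =====
-- counts[site] = counts.get(site, 0) + 1; then [site for site, c in counts.items() if c == count]
def result_alt (ingredients_sites_list : List String) (count : Int) : List String :=
  (((ingredients_sites_list.foldl (fun d x => d.insert x (d.getD x 0 + 1))
      PySem.Dict.empty).items.filter (fun p => p.2 == count)).map (·.1))

-- ===== PRECONDITION & SPEC =====
def Spec_result (ingredients_sites_list : List String) (count : Int) (out : List String) : Prop := out = result_alt ingredients_sites_list count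
instance (ingredients_sites_list : List String) (count : Int) (out : List String) : Decidable (Spec_result ingredients_sites_list count out) := by unfold Spec_result; infer_instance

-- ===== CLAIM (what is proved, stated in full; the proofs are below) =====
def Claim_equal_result : Prop := ∀ (ingredients_sites_list : List String) (count : Int), Dom_result ingredients_sites_list count → Spec_result ingredients_sites_list count (result ingredients_sites_list count)

-- ===== LEMMAS AND PROOFS =====

-- first-occurrence dedup commutes with a pointwise filter
lemma ofList_filter {α : Type} [BEq α] [LawfulBEq α] (p : α → Bool) (xs : List α) :
    PySem.Set.ofList (xs.filter p) = (PySem.Set.ofList xs).filter p := by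
  induction xs with
  | nil => rfl
  | cons x t ih =>
    by_cases hp : p x = true
    · rw [List.filter_cons_of_pos hp, PySem.Set.ofList_cons, PySem.Set.ofList_cons,
        List.filter_cons_of_pos hp, ih]
      simp [PySem.Set.discard, List.filter_filter, Bool.and_comm]
    · rw [List.filter_cons_of_neg hp, PySem.Set.ofList_cons, List.filter_cons_of_neg hp, ih]
      simp [PySem.Set.discard, List.filter_filter]
      congr 1
      funext y
      by_cases hy : y = x
      · subst hy; simp [hp]
      · simp [hy]

-- A's fold is the first-occurrence dedup of the filtered list
lemma result_eq (xs : List String) (c : Int) :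
    result xs c = PySem.Set.ofList (xs.filter (fun s => ((PySem.List.count xs s : Int) == c))) := by
  rw [PySem.Set.ofList_eq_foldl, ← PySem.List.foldl_if_eq_foldl_filter]
  unfold result
  apply PySem.List.foldl_congr_mem
  intro acc x _
  simp [PySem.Set.add, PySem.Set.contains]

-- B is the filtered dedup of the whole list
lemma result_alt_eq (xs : List String) (c : Int) :
    result_alt xs c = (PySem.Set.ofList xs).filter (fun s => ((PySem.List.count xs s : Int) == c)) := by
  unfold result_alt
  rw [PySem.Dict.foldl_insert_getD_add_one_eq_counter, PySem.Dict.items_counter,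
    List.filter_map]
  simp [Function.comp_def]

-- ===== VERDICT (by name: the statement is the Claim_ definition above) =====
theorem result_spec : Claim_equal_result := by
  intro xs c _
  unfold Spec_result
  rw [result_eq, result_alt_eq, ofList_filter]
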